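-- pv_equiv track=rewrite | github.com/bonsai/PyPer | src/pyper-mcp-config.py | _mcp_suggest
-- ===== SOURCE A (Python) =====
-- def _mcp_suggest(task):
--     suggestions = {
--         "画像": ["pyper-media", "natsume"],
--         "image": ["pyper-media", "natsume"],
--         "動画": ["pyper-media"],
--         "video": ["pyper-media"],
--         "trend": ["pyper-media"],
--         "トレンド": ["pyper-media"],
--         "生成": ["pyper-media"],
--         "fall": ["pyper-core"],
--         "プレス": ["pyper-core"],
--         "press": ["pyper-core"],
--         "Gmail": ["pyper-core"],
--         "mail": ["pyper-core"],
--         "戦略": ["pyper-advisor"],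
--         "strategy": ["pyper-advisor"],
--         "法律": ["pyper-advisor"],
--         "law": ["pyper-advisor"],
--         "コード": ["pyper-core", "pyper-advisor"],
--         "code": ["pyper-core", "pyper-advisor"],
--         "review": ["pyper-advisor"],
--         "skill": ["pyper-advisor"],
--         "チャット": ["natsume", "takuboku"],
--         "chat": ["natsume", "takuboku"],
--         "vision": ["sharaku"],
--         "OCR": ["sharaku"],
--         "画像生成": ["hokusai"],
--         "file": ["plagger"],
--         "ファイル": ["plagger"],
--         "計算": ["plagger"],
--         "calc": ["plagger"],
--         "add": ["plagger"],
--         "足し": ["plagger"],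
--     }
--
--     task_lower = task.lower()
--     matched = set()
--     for keyword, servers in suggestions.items():
--         if keyword.lower() in task_lower:
--             matched.update(servers)
--
--     if not matched:
--         return f"No specific recommendation for: '{task}'\nDefault: pyper-core (always enabled)"
--
--     lines = [f"📌 Recommended for '{task}':"]
--     for s in sorted(matched):
--         lines.append(f"  → {s}")
--
--     return "\n".join(lines) + "\n\nEnable with: mcp_toggle(server_name, 'enable')"
-- ===== SOURCE B (Python) =====
-- def _mcp_suggest(task):
--     # Inverted table: server -> keywords, with servers listed in sorted order,
--     # so a single pass over servers yields the matched list already sorted.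
--     server_keywords = {
--         "hokusai": ["画像生成"],
--         "natsume": ["画像", "image", "チャット", "chat"],
--         "plagger": ["file", "ファイル", "計算", "calc", "add", "足し"],
--         "pyper-advisor": ["戦略", "strategy", "法律", "law", "コード", "code", "review", "skill"],
--         "pyper-core": ["fall", "プレス", "press", "Gmail", "mail", "コード", "code"],
--         "pyper-media": ["画像", "image", "動画", "video", "trend", "トレンド", "生成"],
--         "sharaku": ["vision", "OCR"],
--         "takuboku": ["チャット", "chat"],
--     }
--     task_lower = task.lower()
--     matched = [s for s, kws in server_keywords.items()
--                if any(kw.lower() in task_lower for kw in kws)]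
--     if not matched:
--         return f"No specific recommendation for: '{task}'\nDefault: pyper-core (always enabled)"
--     lines = [f"📌 Recommended for '{task}':"] + [f"  → {s}" for s in matched]
--     return "\n".join(lines) + "\n\nEnable with: mcp_toggle(server_name, 'enable')"
-- ===== Notes on version B (the rewrite author's own statement) =====
-- stated objective: alternative
-- what changed: B inverts the keyword->servers dict into a server->keywords table whose keys are listed in sorted order, so one pass over the 8 servers (each tested with any(kw in task)) builds the matched list already sorted, replacing A's union-into-a-set over 31 keywords followed by sorted().
import Mathlib
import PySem

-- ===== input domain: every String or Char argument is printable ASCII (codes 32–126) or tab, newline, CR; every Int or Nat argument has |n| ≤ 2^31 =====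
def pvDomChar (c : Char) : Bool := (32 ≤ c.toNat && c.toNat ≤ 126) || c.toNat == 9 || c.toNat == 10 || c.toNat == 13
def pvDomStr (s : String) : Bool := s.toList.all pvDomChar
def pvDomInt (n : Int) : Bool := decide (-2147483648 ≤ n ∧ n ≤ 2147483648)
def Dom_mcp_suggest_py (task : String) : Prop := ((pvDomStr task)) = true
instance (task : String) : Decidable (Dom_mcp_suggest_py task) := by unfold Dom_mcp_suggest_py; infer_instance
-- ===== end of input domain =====

-- B replaces A's keyword→servers union-into-a-set + sort with a single pass over an
-- inverted server→keywords table whose keys are listed in sorted order, so the matched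
-- list comes out sorted with no set and no sort call (objective: alternative).

-- ===== PORT A =====
def pvSuggestions : List (String × List String) := [
  ("画像", ["pyper-media", "natsume"]),
  ("image", ["pyper-media", "natsume"]),
  ("動画", ["pyper-media"]),
  ("video", ["pyper-media"]),
  ("trend", ["pyper-media"]),
  ("トレンド", ["pyper-media"]),
  ("生成", ["pyper-media"]),
  ("fall", ["pyper-core"]),
  ("プレス", ["pyper-core"]),
  ("press", ["pyper-core"]),
  ("Gmail", ["pyper-core"]),
  ("mail", ["pyper-core"]),
  ("戦略", ["pyper-advisor"]),
  ("strategy", ["pyper-advisor"]),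
  ("法律", ["pyper-advisor"]),
  ("law", ["pyper-advisor"]),
  ("コード", ["pyper-core", "pyper-advisor"]),
  ("code", ["pyper-core", "pyper-advisor"]),
  ("review", ["pyper-advisor"]),
  ("skill", ["pyper-advisor"]),
  ("チャット", ["natsume", "takuboku"]),
  ("chat", ["natsume", "takuboku"]),
  ("vision", ["sharaku"]),
  ("OCR", ["sharaku"]),
  ("画像生成", ["hokusai"]),
  ("file", ["plagger"]),
  ("ファイル", ["plagger"]),
  ("計算", ["plagger"]),
  ("calc", ["plagger"]),
  ("add", ["plagger"]),
  ("足し", ["plagger"])]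

def mcp_suggest_py (task : String) : String :=
  let task_lower := PySem.Str.lower task
  let matched : PySem.Set String :=
    pvSuggestions.foldl
      (fun (m : PySem.Set String) p =>
        if PySem.Str.isIn (PySem.Str.lower p.1) task_lower then PySem.Set.update m p.2 else m)
      PySem.Set.empty
  if matched = [] then
    "No specific recommendation for: '" ++ task ++ "'\nDefault: pyper-core (always enabled)"
  else
    PySem.Str.join "\n" (("📌 Recommended for '" ++ task ++ "':") ::
      (PySem.List.sorted matched (fun x => x) false).map (fun s => "  → " ++ s))
    ++ "\n\nEnable with: mcp_toggle(server_name, 'enable')"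

-- ===== PORT B =====
def pvServerKeywords : List (String × List String) := [
  ("hokusai", ["画像生成"]),
  ("natsume", ["画像", "image", "チャット", "chat"]),
  ("plagger", ["file", "ファイル", "計算", "calc", "add", "足し"]),
  ("pyper-advisor", ["戦略", "strategy", "法律", "law", "コード", "code", "review", "skill"]),
  ("pyper-core", ["fall", "プレス", "press", "Gmail", "mail", "コード", "code"]),
  ("pyper-media", ["画像", "image", "動画", "video", "trend", "トレンド", "生成"]),
  ("sharaku", ["vision", "OCR"]),
  ("takuboku", ["チャット", "chat"])]

def mcp_suggest_py_alt (task : String) : String :=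
  let task_lower := PySem.Str.lower task
  let matched : List String :=
    (pvServerKeywords.filter
      (fun p => p.2.any (fun kw => PySem.Str.isIn (PySem.Str.lower kw) task_lower))).map Prod.fst
  if matched = [] then
    "No specific recommendation for: '" ++ task ++ "'\nDefault: pyper-core (always enabled)"
  else
    PySem.Str.join "\n" (("📌 Recommended for '" ++ task ++ "':") :: matched.map (fun s => "  → " ++ s))
    ++ "\n\nEnable with: mcp_toggle(server_name, 'enable')"

-- ===== PRECONDITION & SPEC =====
def Spec_mcp_suggest_py (task : String) (out : String) : Prop := out = mcp_suggest_py_alt task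
instance (task : String) (out : String) : Decidable (Spec_mcp_suggest_py task out) := by unfold Spec_mcp_suggest_py; infer_instance

-- ===== CLAIM (what is proved, stated in full; the proofs are below) =====
def Claim_equal_mcp_suggest_py : Prop := ∀ (task : String), Dom_mcp_suggest_py task → Spec_mcp_suggest_py task (mcp_suggest_py task)

-- ===== LEMMAS AND PROOFS =====

-- the matched accumulator of A's loop, over an arbitrary keyword test c
def pvFoldA (c : String → Bool) (l : List (String × List String)) (acc : PySem.Set String) : PySem.Set String :=
  l.foldl (fun m p => if c p.1 then PySem.Set.update m p.2 else m) acc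

-- B's matched list, over an arbitrary keyword test c
def pvMatchedB (c : String → Bool) : List String :=
  (pvServerKeywords.filter (fun p => p.2.any c)).map Prod.fst

lemma pvFoldA_nodup (c : String → Bool) (l : List (String × List String)) (acc : PySem.Set String)
    (h : acc.Nodup) : (pvFoldA c l acc).Nodup := by
  induction l generalizing acc with
  | nil => exact h
  | cons p t ih =>
      simp only [pvFoldA, List.foldl_cons]
      by_cases hc : c p.1 = true
      · simp only [hc, if_pos]
        exact ih _ (PySem.Set.nodup_update _ _ h)
      · simp only [hc]
        exact ih _ h

lemma pvFoldA_mem (c : String → Bool) (l : List (String × List String)) (acc : PySem.Set String)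
    (s : String) : s ∈ pvFoldA c l acc ↔ s ∈ acc ∨ ∃ p ∈ l, c p.1 = true ∧ s ∈ p.2 := by
  induction l generalizing acc with
  | nil => simp [pvFoldA]
  | cons p t ih =>
      simp only [pvFoldA, List.foldl_cons] at *
      by_cases hc : c p.1 = true
      · simp [hc, ih, PySem.Set.mem_update, or_assoc]
      · simp [hc, ih]

set_option maxHeartbeats 1000000 in
lemma pvMatched_mem (c : String → Bool) (s : String) :
    s ∈ pvFoldA c pvSuggestions PySem.Set.empty ↔ s ∈ pvMatchedB c := by
  rw [pvFoldA_mem]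
  simp only [pvMatchedB, PySem.Set.empty, List.not_mem_nil, false_or, List.mem_map,
    List.mem_filter, pvSuggestions, pvServerKeywords, List.mem_cons,
    List.any_cons, List.any_nil, Bool.or_eq_true, Bool.or_false,
    and_assoc, exists_eq_or_imp, exists_eq_left, or_false]
  constructor
  · rintro (⟨hc, rfl | rfl⟩ | ⟨hc, rfl | rfl⟩ | ⟨hc, rfl⟩ | ⟨hc, rfl⟩ | ⟨hc, rfl⟩ | ⟨hc, rfl⟩ | ⟨hc, rfl⟩ | ⟨hc, rfl⟩ | ⟨hc, rfl⟩ | ⟨hc, rfl⟩ | ⟨hc, rfl⟩ | ⟨hc, rfl⟩ | ⟨hc, rfl⟩ | ⟨hc, rfl⟩ | ⟨hc, rfl⟩ | ⟨hc, rfl⟩ | ⟨hc, rfl | rfl⟩ | ⟨hc, rfl | rfl⟩ | ⟨hc, rfl⟩ | ⟨hc, rfl⟩ | ⟨hc, rfl | rfl⟩ | ⟨hc, rfl | rfl⟩ | ⟨hc, rfl⟩ | ⟨hc, rfl⟩ | ⟨hc, rfl⟩ | ⟨hc, rfl⟩ | ⟨hc, rfl⟩ | ⟨hc, rfl⟩ |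 ⟨hc, rfl⟩ | ⟨hc, rfl⟩ | ⟨hc, rfl⟩) <;> simp [hc]
  · rintro (⟨hc, rfl⟩ | ⟨hc, rfl⟩ | ⟨hc, rfl⟩ | ⟨hc, rfl⟩ | ⟨hc, rfl⟩ | ⟨hc, rfl⟩ | ⟨hc, rfl⟩ | ⟨hc, rfl⟩) <;> simp only [String.reduceEq, and_true, or_false, false_or, and_false] <;> tauto

lemma pvMatchedB_pairwise (c : String → Bool) : (pvMatchedB c).Pairwise (fun a b => a < b) := by
  have hsub : (pvMatchedB c).Sublist (pvServerKeywords.map Prod.fst) :=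
    List.Sublist.map Prod.fst List.filter_sublist
  have hpw : (pvServerKeywords.map Prod.fst).Pairwise (fun a b => a < b) := by
    simp only [pvServerKeywords, List.map_cons, List.map_nil, List.pairwise_cons,
      List.mem_cons, List.not_mem_nil, String.lt_iff_toList_lt, or_false, forall_eq_or_imp, forall_eq, false_implies, List.Pairwise.nil, and_true, forall_true_iff]
    decide
  exact hpw.sublist hsub

lemma pvMatchedB_nodup (c : String → Bool) : (pvMatchedB c).Nodup :=
  (pvMatchedB_pairwise c).imp ne_of_lt

lemma pvSorted_fold_eq (c : String → Bool) :
    PySem.List.sorted (pvFoldA c pvSuggestions PySem.Set.empty) (fun x => x) = pvMatchedB c := by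
  apply PySem.List.sorted_eq_of_perm_of_pairwise_lt
  · exact (List.perm_ext_iff_of_nodup (pvMatchedB_nodup c)
      (pvFoldA_nodup c _ _ List.nodup_nil)).mpr (fun s => (pvMatched_mem c s).symm)
  · exact pvMatchedB_pairwise c

-- ===== VERDICT (by name: the statement is the Claim_ definition above) =====
theorem mcp_suggest_py_spec : Claim_equal_mcp_suggest_py := by
  intro task _
  show mcp_suggest_py task = mcp_suggest_py_alt task
  unfold mcp_suggest_py mcp_suggest_py_alt
  have h := pvSorted_fold_eq (fun kw => PySem.Str.isIn (PySem.Str.lower kw) (PySem.Str.lower task))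
  simp only [pvFoldA, pvMatchedB] at h
  by_cases hempty :
      pvSuggestions.foldl
        (fun (m : PySem.Set String) p =>
          if PySem.Str.isIn (PySem.Str.lower p.1) (PySem.Str.lower task) then PySem.Set.update m p.2 else m)
        PySem.Set.empty = []
  · have hB : (pvServerKeywords.filter
        (fun p => p.2.any (fun kw => PySem.Str.isIn (PySem.Str.lower kw) (PySem.Str.lower task)))).map Prod.fst = [] := by
      rw [← h, hempty]
      exact (PySem.List.sorted_eq_nil_iff _ _ _).mpr rfl
    simp only [hempty, hB, if_pos]
  · have hB : ¬ ((pvServerKeywords.filter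
        (fun p => p.2.any (fun kw => PySem.Str.isIn (PySem.Str.lower kw) (PySem.Str.lower task)))).map Prod.fst = []) := by
      intro hb
      exact hempty ((PySem.List.sorted_eq_nil_iff _ _ _).mp (h.trans hb))
    simp only [hempty, hB, h]
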